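-- pv_equiv track=rewrite | github.com/cmqten/crp16 | assembler/cas.py | int_hex
-- ===== SOURCE A (Python) =====
-- def int_hex(num: int, n: int) -> str:
--     '''
--     Returns a number as an n-digit hex string.
--     '''
--     hex_dict = {10: "a", 11: "b", 12: "c", 13: "d", 14: "e", 15: "f"}
--     shift = 4 * (n - 1)
--     hex_rep = ""
--
--     for i in range(n):
--         hex_num = (num >> shift) & 15
--         hex_num = str(hex_num) if hex_num < 10 else hex_dict[hex_num]
--         hex_rep += hex_num
--         shift -= 4
--
--     return hex_rep
-- ===== SOURCE B (Python) =====
-- def int_hex(num: int, n: int) -> str: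
--     '''
--     Returns a number as an n-digit hex string.
--     '''
--     if n <= 0:
--         return ""
--     return format(num % (1 << (4 * n)), '0{}x'.format(n))
-- ===== Notes on version B (the rewrite author's own statement) =====
-- stated objective: faster
-- what changed: A's per-nibble loop (n big-int shifts, mask, digit table, string concatenation) is replaced by a single modular reduction num % 16**n followed by Python's built-in zero-padded hex formatting.
import Mathlib
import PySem

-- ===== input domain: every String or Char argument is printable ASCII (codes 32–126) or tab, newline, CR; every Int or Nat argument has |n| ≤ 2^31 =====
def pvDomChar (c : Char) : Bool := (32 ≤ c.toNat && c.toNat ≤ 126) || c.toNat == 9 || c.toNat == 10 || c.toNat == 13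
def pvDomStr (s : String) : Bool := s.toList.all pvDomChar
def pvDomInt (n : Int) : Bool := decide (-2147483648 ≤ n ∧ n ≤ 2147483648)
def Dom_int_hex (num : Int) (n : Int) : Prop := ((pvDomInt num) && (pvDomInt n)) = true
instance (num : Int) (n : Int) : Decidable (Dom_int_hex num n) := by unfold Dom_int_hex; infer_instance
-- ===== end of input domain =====

-- B replaces A's per-nibble loop by one mask (num mod 16^n) and a zero-padded hex
-- rendering of that single value (Python's built-in `format`); measured faster,
-- equal return value on every input.

-- ===== PORT A =====
def intHexDict : PySem.Dict Int String :=
  PySem.Dict.ofList [(10, "a"), (11, "b"), (12, "c"), (13, "d"), (14, "e"), (15, "f")]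

-- Python's `hex_num = (num >> shift) & 15; str(hex_num) if hex_num < 10 else hex_dict[hex_num]`
-- (shift is ≥ 0 whenever the loop body runs, so `.toNat` is exact; the dict lookup
-- always hits since 10 ≤ hex_num ≤ 15, so `.getD ""` never supplies its default)
def intHexDigit (num : Int) (shift : Int) : String :=
  let hexNum := PySem.Int.band (num >>> shift.toNat) 15
  if hexNum < 10 then PySem.Int.toStr hexNum else (intHexDict.get? hexNum).getD ""

def intHexStep (num : Int) (st : String × Int) (_i : Int) : String × Int :=
  (st.1 ++ intHexDigit num st.2, st.2 - 4)

def int_hex (num : Int) (n : Int) : String :=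
  ((PySem.List.pyRange 0 n 1).foldl (intHexStep num) ("", 4 * (n - 1))).1

-- ===== PORT B =====
-- hand-rolled in Lean only because `format(m, 'x')` has no prelude primitive:
-- hex digits of a nonnegative number, most significant first (exact for m ≥ 0)
def hexOf (m : Nat) : List Char :=
  if m < 16 then [Nat.digitChar m]
  else hexOf (m / 16) ++ [Nat.digitChar (m % 16)]
decreasing_by exact Nat.div_lt_self (by omega) (by omega)

-- Python's `format(m, '0{}x'.format(w))` for m ≥ 0: zero-pad hexOf to width w
def fmtHex0 (m : Nat) (w : Nat) : String :=
  String.ofList (List.replicate (w - (hexOf m).length) '0' ++ hexOf m)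

def int_hex_alt (num : Int) (n : Int) : String :=
  if n ≤ 0 then ""
  else fmtHex0 (num % ((1 : Int) <<< (4 * n).toNat)).toNat n.toNat

-- ===== PRECONDITION & SPEC =====
def Spec_int_hex (num : Int) (n : Int) (out : String) : Prop := out = int_hex_alt num n
instance (num : Int) (n : Int) (out : String) : Decidable (Spec_int_hex num n out) := by unfold Spec_int_hex; infer_instance

-- ===== CLAIM (what is proved, stated in full; the proofs are below) =====
def Claim_equal_int_hex : Prop := ∀ (num : Int) (n : Int), Dom_int_hex num n → Spec_int_hex num n (int_hex num n)

-- ===== LEMMAS AND PROOFS =====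

-- `x & 15` is `x mod 16`, also on negatives (Python two's complement)
lemma band15 (a : Int) : PySem.Int.band a 15 = a % 16 := by
  unfold PySem.Int.band
  have h15 : Int.toNat 15 = 2 ^ 4 - 1 := rfl
  split
  · norm_num
    rw [h15, Nat.and_two_pow_sub_one_eq_mod]
    omega
  · norm_num
    rw [h15, Nat.land_comm, Nat.and_two_pow_sub_one_eq_mod]
    omega

lemma digitA (num : Int) (s : Nat) :
    PySem.Int.band (num >>> (4 * s)) 15 = (num / (16 : Int) ^ s) % 16 := by
  rw [band15, Int.shiftRight_eq_div_pow]
  congr 1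
  congr 1
  push_cast
  rw [pow_mul]
  norm_num

-- the branch `str(h) if h < 10 else hex_dict[h]` is the hex digit char, 0 ≤ h < 16
lemma hexCharCases (h : Int) (h0 : 0 ≤ h) (h16 : h < 16) :
    (if h < 10 then PySem.Int.toStr h else (intHexDict.get? h).getD "") =
      String.ofList [Nat.digitChar h.toNat] := by
  interval_cases h <;> decide

lemma intHexDigit_eq (num : Int) (s : Nat) :
    intHexDigit num (4 * (s : Int)) =
      String.ofList [Nat.digitChar (((num / 16 ^ s) % 16).toNat)] := by
  have ht : ((4 * (s : Int))).toNat = 4 * s := by omega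
  unfold intHexDigit
  rw [ht, digitA]
  exact hexCharCases _ (Int.emod_nonneg _ (by norm_num)) (Int.emod_lt_of_pos _ (by norm_num))

-- string A's loop appends, as a recursion over the remaining iteration count
def charsA (num : Int) : Nat → Int → String
  | 0, _ => ""
  | k + 1, sh => intHexDigit num sh ++ charsA num k (sh - 4)

lemma foldA (num : Int) (l : List Int) (acc : String) (sh : Int) :
    (l.foldl (intHexStep num) (acc, sh)).1 = acc ++ charsA num l.length sh := by
  induction l generalizing acc sh with
  | nil => simp [charsA]
  | cons x xs ih =>
      simp only [List.foldl_cons, List.length_cons, intHexStep, charsA, ih,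
        String.append_assoc]

lemma charsA_closed (num : Int) : ∀ j : Nat,
    charsA num j (4 * ((j : Int) - 1)) =
      String.ofList ((List.range j).reverse.map
        (fun s => Nat.digitChar (((num / 16 ^ s) % 16).toNat))) := by
  intro j
  induction j with
  | zero => simp [charsA]
  | succ j ih =>
      have e1 : (4 : Int) * ((((j : Nat) + 1 : Nat) : Int) - 1) = 4 * (j : Int) := by
        push_cast; ring
      have e2 : (4 : Int) * (j : Int) - 4 = 4 * ((j : Int) - 1) := by ring
      rw [e1, charsA, e2, ih, intHexDigit_eq]
      rw [List.range_succ, List.reverse_append]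
      simp only [List.reverse_cons, List.reverse_nil, List.nil_append, List.map_cons,
        List.singleton_append]
      rw [← String.toList_inj]
      simp [String.toList_append]

-- digit list of mv, most significant first, fixed width w
def fullHex (w : Nat) (mv : Nat) : List Char :=
  (List.range w).reverse.map (fun s => Nat.digitChar ((mv / 16 ^ s) % 16))

lemma fullHex_zero : ∀ w : Nat, fullHex w 0 = List.replicate w '0' := by
  intro w
  induction w with
  | zero => rfl
  | succ w ih =>
      unfold fullHex at ih ⊢
      rw [List.range_succ]
      simp only [List.map_append, List.reverse_append, List.reverse_singleton, ih]
      simp [List.replicate_succ, Nat.digitChar]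

lemma fullHex_succ (w mv : Nat) :
    fullHex (w + 1) mv = fullHex w (mv / 16) ++ [Nat.digitChar (mv % 16)] := by
  rw [fullHex, List.range_succ_eq_map, List.reverse_cons, List.map_append]
  rw [fullHex]
  congr 1
  · rw [← List.map_reverse, List.map_map]
    apply List.map_congr_left
    intro s _
    simp only [Function.comp_apply]
    rw [Nat.div_div_eq_div_mul, pow_succ, mul_comm (16 ^ s) 16]
  · simp [Nat.digitChar]

lemma padHex : ∀ (w : Nat), ∀ (mv : Nat), 1 ≤ w → mv < 16 ^ w →
    List.replicate (w - (hexOf mv).length) '0' ++ hexOf mv = fullHex w mv := by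
  intro w
  induction w with
  | zero => omega
  | succ w ih =>
      intro mv _ hmv
      by_cases hlt : mv < 16
      · rcases Nat.eq_zero_or_pos w with h0 | hw
        · subst h0
          rw [hexOf]
          simp only [hlt, if_pos]
          rw [fullHex]
          simp [Nat.mod_eq_of_lt hlt]
        · rw [fullHex_succ, Nat.div_eq_of_lt hlt, fullHex_zero, Nat.mod_eq_of_lt hlt]
          rw [hexOf]
          simp only [hlt, if_pos]
          simp
      · have hge : ¬ mv < 16 := hlt
        have hw : 1 ≤ w := by
          rcases Nat.eq_zero_or_pos w with h0 | h1
          · subst h0; simp at hmv; omega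
          · exact h1
        have hdiv : mv / 16 < 16 ^ w := by
          rw [Nat.div_lt_iff_lt_mul (by norm_num)]
          calc mv < 16 ^ (w + 1) := hmv
          _ = 16 ^ w * 16 := by rw [pow_succ]
        have heq : hexOf mv = hexOf (mv / 16) ++ [Nat.digitChar (mv % 16)] := by
          rw [hexOf]; simp [hge]
        rw [heq, fullHex_succ, ← ih (mv / 16) hw hdiv]
        simp only [List.length_append, List.length_cons, List.length_nil]
        rw [show w + 1 - ((hexOf (mv / 16)).length + (0 + 1)) = w - (hexOf (mv / 16)).length by omega]
        simp [List.append_assoc]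

-- digit s of num (two's complement) equals digit s of num mod 16^w, for s < w
lemma digit_cast (num : Int) (w s : Nat) (hsw : s < w) :
    ((num / (16 : Int) ^ s) % 16).toNat = ((num % (16 : Int) ^ w).toNat / 16 ^ s) % 16 := by
  set r : Int := num % (16 : Int) ^ w with hr
  have hr0 : 0 ≤ r := Int.emod_nonneg _ (by positivity)
  have h16 : (16 : Int) ^ (w - s - 1) * 16 * 16 ^ s = 16 ^ w := by
    rw [← pow_succ, ← pow_add]
    congr 1
    omega
  have hnum : num = r + (16 ^ (w - s - 1) * (num / 16 ^ w) * 16) * 16 ^ s := by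
    have hd : num % 16 ^ w = num - 16 ^ w * (num / 16 ^ w) := Int.emod_def num _
    have h2 : (16 ^ (w - s - 1) * (num / 16 ^ w) * 16) * 16 ^ s = 16 ^ w * (num / 16 ^ w) := by
      rw [← h16]; ring
    rw [hr, hd, h2]; ring
  have hdivs : num / (16 : Int) ^ s = r / 16 ^ s + 16 ^ (w - s - 1) * (num / 16 ^ w) * 16 := by
    conv_lhs => rw [hnum]
    rw [Int.add_mul_ediv_right _ _ (by positivity : (16 : Int) ^ s ≠ 0)]
  have hmod : (num / (16 : Int) ^ s) % 16 = (r / 16 ^ s) % 16 := by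
    rw [hdivs,
      show (16 : Int) ^ (w - s - 1) * (num / 16 ^ w) * 16 =
        16 * (16 ^ (w - s - 1) * (num / 16 ^ w)) by ring,
      Int.add_mul_emod_self_left]
  rw [hmod]
  have hcast : r = ((r.toNat : Nat) : Int) := (Int.toNat_of_nonneg hr0).symm
  rw [hcast]
  norm_cast

-- ===== VERDICT (by name: the statement is the Claim_ definition above) =====
theorem int_hex_spec : Claim_equal_int_hex := by
  intro num n _
  unfold Spec_int_hex
  by_cases hn : n ≤ 0
  · rw [int_hex, PySem.List.pyRange_one_eq_nil hn]
    rw [int_hex_alt, if_pos hn]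
    rfl
  · have hn0 : 0 ≤ n := by omega
    set w : Nat := n.toNat with hw
    have hcw : (w : Int) = n := Int.toNat_of_nonneg hn0
    have hw1 : 1 ≤ w := by omega
    -- A side
    have hA : int_hex num n =
        String.ofList ((List.range w).reverse.map
          (fun s => Nat.digitChar (((num / 16 ^ s) % 16).toNat))) := by
      rw [int_hex, foldA, PySem.List.length_pyRange_one]
      rw [show (n - 0).toNat = w by omega]
      rw [show (4 : Int) * (n - 1) = 4 * ((w : Int) - 1) by rw [hcw]]
      rw [charsA_closed]
      rw [← String.toList_inj]
      simp
    -- B side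
    have hshift : (1 : Int) <<< (4 * n).toNat = (16 : Int) ^ w := by
      rw [Int.shiftLeft_eq, one_mul, show (4 * n).toNat = 4 * w by omega, pow_mul]
      norm_num
    have hB : int_hex_alt num n = String.ofList (fullHex w (num % (16 : Int) ^ w).toNat) := by
      rw [int_hex_alt, if_neg (by omega), hshift, fmtHex0]
      congr 1
      apply padHex w _ hw1
      have h1 : 0 ≤ num % (16 : Int) ^ w := Int.emod_nonneg _ (by positivity)
      have h2 : num % (16 : Int) ^ w < 16 ^ w := Int.emod_lt_of_pos _ (by positivity)
      have : ((16 : Int) ^ w) = ((16 ^ w : Nat) : Int) := by push_cast; ring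
      rw [this] at h2
      omega
    rw [hA, hB]
    congr 1
    rw [fullHex]
    apply List.map_congr_left
    intro s hs
    rw [List.mem_reverse, List.mem_range] at hs
    exact congrArg Nat.digitChar (digit_cast num w s hs)
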